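-- pv_equiv track=rewrite | github.com/writecoffee/algorithm_crunching_social_network | ps3.9.py | create_rooted_spanning_tree
-- ===== SOURCE A (Python) =====
-- def create_rooted_spanning_tree(G, root):
--     S = {root:{}}
--     node_list = [root]
--     node_exists = {root:True}
--     while node_list:
--         curr = node_list.pop()
--         rvs = [val for val in G[curr].keys()]
--         rvs.reverse()
--         for neighbor in rvs:
--             if neighbor not in node_exists:
--                 node_exists[neighbor] = True
--                 node_list.append(neighbor)
--                 S[neighbor] = {}
--                 S[curr][neighbor] = 'green'
--             elif curr in S[neighbor] and S[neighbor][curr] == 'green':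
--                 S[curr][neighbor] = 'green'
--             else:
--                 S[curr][neighbor] = 'red'
--     return S
-- ===== SOURCE B (Python) =====
-- def create_rooted_spanning_tree(G, root):
--     # Two-pass version: DFS records only the parent map and discovery order;
--     # a separate pass classifies every edge from the parent map.
--     parent = {root: None}
--     order = [root]
--     stack = [root]
--     while stack:
--         u = stack.pop()
--         for v in reversed(list(G[u].keys())):
--             if v not in parent:
--                 parent[v] = u
--                 order.append(v)
--                 stack.append(v)
--     return {u: {v: ('green' if parent.get(v) == u or parent.get(u) == v else 'red')
--                 for v in reversed(list(G[u].keys()))}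
--             for u in order}
-- ===== Notes on version B (the rewrite author's own statement) =====
-- stated objective: alternative
-- what changed: B separates spanning-tree construction from edge classification: the DFS records only a parent map and the discovery order, and a second pass rebuilds the whole colouring dict from the parent map, instead of A's colouring of S incrementally inside the DFS with lookups into partially built rows.
-- outside the precondition, e.g. on create_rooted_spanning_tree({'a': {}, 'b': {'c': 1}}, 'a'): A returns {'a': {}}, B returns {'a': {}}
import Mathlib
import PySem

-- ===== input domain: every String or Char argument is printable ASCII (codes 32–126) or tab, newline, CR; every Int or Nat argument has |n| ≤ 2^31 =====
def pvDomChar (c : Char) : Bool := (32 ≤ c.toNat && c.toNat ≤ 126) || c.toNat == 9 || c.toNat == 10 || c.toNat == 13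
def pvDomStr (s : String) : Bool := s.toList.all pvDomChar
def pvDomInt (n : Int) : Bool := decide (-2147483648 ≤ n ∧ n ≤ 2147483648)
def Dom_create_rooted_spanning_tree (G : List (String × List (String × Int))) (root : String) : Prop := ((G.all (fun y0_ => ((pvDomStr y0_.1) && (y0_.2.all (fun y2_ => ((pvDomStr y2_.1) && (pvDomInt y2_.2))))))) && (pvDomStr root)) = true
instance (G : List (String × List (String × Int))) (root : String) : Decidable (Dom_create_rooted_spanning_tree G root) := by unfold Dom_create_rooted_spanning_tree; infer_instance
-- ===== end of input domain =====

-- B separates spanning-tree construction (a DFS recording only a parent map and discovery order)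
-- from edge classification (a second pass rebuilding the colouring from the parent map);
-- A colours during the DFS by consulting partially built rows of S.  Objective: alternative.

-- ===== PORT A =====
-- the while loop of A; state = (S, node_list, node_exists); fuel is only a totality guard
def aLoop (Gd : PySem.Dict String (List (String × Int))) :
    Nat → PySem.Dict String (PySem.Dict String String) → List String → PySem.Dict String Bool →
    PySem.Dict String (PySem.Dict String String)
  | 0, S, _, _ => S
  | fuel + 1, S, stack, ex =>
    match PySem.List.pop? stack (-1) with
    | none => S
    | some (curr, rest) =>
      match Gd.get? curr with
      | none => S   -- Python raises KeyError here; excluded by Pre_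
      | some adj =>
        let rvs := (PySem.Dict.ofList adj).keys.reverse
        let st := rvs.foldl (fun (st : PySem.Dict String (PySem.Dict String String) × List String × PySem.Dict String Bool) nb =>
          let (S, nl, ex) := st
          if ex.contains nb = false then
            let S1 := S.insert nb PySem.Dict.empty
            (S1.insert curr ((S1.getD curr PySem.Dict.empty).insert nb "green"),
             nl ++ [nb], ex.insert nb true)
          else if (S.getD nb PySem.Dict.empty).get? curr = some "green" then
            (S.insert curr ((S.getD curr PySem.Dict.empty).insert nb "green"), nl, ex)
          else
            (S.insert curr ((S.getD curr PySem.Dict.empty).insert nb "red"), nl, ex)) (S, rest, ex)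
        aLoop Gd fuel st.1 st.2.1 st.2.2

def create_rooted_spanning_tree (G : List (String × List (String × Int))) (root : String) : List (String × List (String × String)) :=
  let Gd := PySem.Dict.ofList G
  let S0 := (PySem.Dict.empty : PySem.Dict String (PySem.Dict String String)).insert root PySem.Dict.empty
  let ex0 := (PySem.Dict.empty : PySem.Dict String Bool).insert root true
  let fuel := 1 + (G.flatMap (fun p => p.2.map (·.1))).length
  (aLoop Gd fuel S0 [root] ex0).items.map (fun p => (p.1, p.2.items))

-- ===== PORT B =====
-- B's while loop; state = (parent, order, stack); fuel is only a totality guard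
def bLoop (Gd : PySem.Dict String (List (String × Int))) :
    Nat → PySem.Dict String (Option String) → List String → List String →
    PySem.Dict String (Option String) × List String
  | 0, parent, order, _ => (parent, order)
  | fuel + 1, parent, order, stack =>
    match PySem.List.pop? stack (-1) with
    | none => (parent, order)
    | some (u, rest) =>
      match Gd.get? u with
      | none => (parent, order)   -- Python raises KeyError here; excluded by Pre_
      | some adj =>
        let st := ((PySem.Dict.ofList adj).keys.reverse).foldl
          (fun (st : PySem.Dict String (Option String) × List String × List String) v =>
            let (p, o, s) := st
            if p.contains v = false then (p.insert v (some u), o ++ [v], s ++ [v]) else st)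
          (parent, order, rest)
        bLoop Gd fuel st.1 st.2.1 st.2.2

def create_rooted_spanning_tree_alt (G : List (String × List (String × Int))) (root : String) : List (String × List (String × String)) :=
  let Gd := PySem.Dict.ofList G
  let fuel := 1 + (G.flatMap (fun p => p.2.map (·.1))).length
  let pr := bLoop Gd fuel ((PySem.Dict.empty : PySem.Dict String (Option String)).insert root none) [root] [root]
  pr.2.map (fun u =>
    (u, match Gd.get? u with
        | none => []   -- Python raises KeyError here; excluded by Pre_
        | some adj => ((PySem.Dict.ofList adj).keys.reverse).map (fun v =>
            (v, if pr.1.getD v none = some u ∨ pr.1.getD u none = some v then "green" else "red"))))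

-- ===== PRECONDITION & SPEC =====
-- Pre_ excludes graphs with any dangling neighbour reference (a neighbour that is not a key of G):
-- A raises KeyError when such a neighbour is reachable from root; this is slightly narrower than
-- A's exact domain, since A still returns on graphs whose dangling references are all unreachable
-- (B returns the same value as A there).  It also requires root itself to be a key (else KeyError).
def Pre_create_rooted_spanning_tree (G : List (String × List (String × Int))) (root : String) : Prop :=
  root ∈ G.map Prod.fst ∧ ∀ p ∈ G, ∀ q ∈ p.2, q.1 ∈ G.map Prod.fst
instance (G : List (String × List (String × Int))) (root : String) : Decidable (Pre_create_rooted_spanning_tree G root) := by unfold Pre_create_rooted_spanning_tree; infer_instance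

def pvWitness_create_rooted_spanning_tree : (List (String × List (String × Int))) × String :=
  ([("a", [("b", 1)]), ("b", [("a", 1)])], "a")

def Spec_create_rooted_spanning_tree (G : List (String × List (String × Int))) (root : String) (out : List (String × List (String × String))) : Prop := out = create_rooted_spanning_tree_alt G root
instance (G : List (String × List (String × Int))) (root : String) (out : List (String × List (String × String))) : Decidable (Spec_create_rooted_spanning_tree G root out) := by unfold Spec_create_rooted_spanning_tree; infer_instance

-- ===== CLAIM (what is proved, stated in full; the proofs are below) =====
def Claim_equal_create_rooted_spanning_tree : Prop := ∀ (G : List (String × List (String × Int))) (root : String), Dom_create_rooted_spanning_tree G root → Pre_create_rooted_spanning_tree G root → Spec_create_rooted_spanning_tree G root (create_rooted_spanning_tree G root)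

-- ===== LEMMAS AND PROOFS =====

-- reversed key list of G[u] (the list A calls `rvs`), [] when u is not a key
def rvsOf (Gd : PySem.Dict String (List (String × Int))) (u : String) : List String :=
  match Gd.get? u with
  | none => []
  | some adj => (PySem.Dict.ofList adj).keys.reverse

-- B's colour of the edge u→v, from a parent map
def colr (parent : PySem.Dict String (Option String)) (u v : String) : String :=
  if parent.getD v none = some u ∨ parent.getD u none = some v then "green" else "red"

-- the colour A writes for neighbour v while popping curr, relative to the pre-pop parent map
def col0 (parent0 : PySem.Dict String (Option String)) (curr v : String) : String :=
  if parent0.contains v = true then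
    (if parent0.getD curr none = some v then "green" else "red")
  else "green"

-- the full colour row of a popped node u
def rowD (Gd : PySem.Dict String (List (String × Int))) (parent : PySem.Dict String (Option String))
    (u : String) : PySem.Dict String String :=
  (rvsOf Gd u).foldl (fun d v => d.insert v (colr parent u v)) PySem.Dict.empty

-- nodes of `pre` that were fresh when processed (parent0 = pre-pop parent map)
def freshOf (parent0 : PySem.Dict String (Option String)) (pre : List String) : List String :=
  pre.filter (fun v => !parent0.contains v)

def parentAt (parent0 : PySem.Dict String (Option String)) (curr : String) (pre : List String) :
    PySem.Dict String (Option String) :=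
  (freshOf parent0 pre).foldl (fun p v => p.insert v (some curr)) parent0

-- the partially built row of curr after processing `pre`
def rowAt (parent0 : PySem.Dict String (Option String)) (curr : String) (pre : List String) :
    PySem.Dict String String :=
  pre.foldl (fun d v => d.insert v (col0 parent0 curr v)) PySem.Dict.empty

-- A's S.items mid-way through popping curr, after processing `pre`
def itemsAt (Gd : PySem.Dict String (List (String × Int))) (parent0 : PySem.Dict String (Option String))
    (curr : String) (order0 rest : List String) (pre : List String) :
    List (String × PySem.Dict String String) :=
  order0.map (fun u => if u = curr then (u, rowAt parent0 curr pre)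
    else (u, if u ∈ rest then PySem.Dict.empty else rowD Gd parent0 u))
  ++ (freshOf parent0 pre).map (fun v => (v, PySem.Dict.empty))

-- the joint invariant between iterations of the two while loops
def SimInv (Gd : PySem.Dict String (List (String × Int))) (parent : PySem.Dict String (Option String))
    (order stack : List String) (S : PySem.Dict String (PySem.Dict String String))
    (ex : PySem.Dict String Bool) : Prop :=
  S.items = order.map (fun u => (u, if u ∈ stack then PySem.Dict.empty else rowD Gd parent u))
  ∧ parent.keys = order
  ∧ (∀ v, ex.contains v = parent.contains v)
  ∧ order.Nodup
  ∧ stack.Nodup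
  ∧ (∀ v ∈ stack, v ∈ order)
  ∧ (∀ v w, parent.get? v = some (some w) → w ∈ order ∧ w ∉ stack ∧ v ∈ rvsOf Gd w ∧ v ≠ w)
  ∧ (∀ u ∈ order, u ∉ stack → ∀ v ∈ rvsOf Gd u, parent.contains v = true)
  ∧ (∀ v ∈ order, Gd.contains v = true)

lemma nodup_rvsOf (Gd : PySem.Dict String (List (String × Int))) (u : String) : (rvsOf Gd u).Nodup := by
  unfold rvsOf
  cases Gd.get? u with
  | none => simp
  | some adj => simp only [List.nodup_reverse]; exact PySem.Dict.nodup_keys_ofList adj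

lemma ofList_concat {ν : Type} (ps : List (String × ν)) (p : String × ν) :
    PySem.Dict.ofList (ps ++ [p]) = (PySem.Dict.ofList ps).insert p.1 p.2 := by
  show (ps ++ [p]).foldl (fun d q => d.insert q.1 q.2) PySem.Dict.empty = _
  rw [List.foldl_append]
  rfl

lemma get?_ofList_mem {ν : Type} (ps : List (String × ν)) (k : String) (v : ν)
    (h : (PySem.Dict.ofList ps).get? k = some v) : (k, v) ∈ ps := by
  induction ps using List.reverseRecOn with
  | nil => rw [show PySem.Dict.ofList ([] : List (String × ν)) = PySem.Dict.empty from rfl, PySem.Dict.get?_empty] at h; cases h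
  | append_singleton ps p ih =>
    rw [ofList_concat, PySem.Dict.get?_insert] at h
    by_cases hk : k = p.1
    · rw [if_pos hk] at h
      have hv : v = p.2 := by cases h; rfl
      subst hv; subst hk
      exact List.mem_append_right _ (by simp)
    · rw [if_neg hk] at h
      exact List.mem_append_left _ (ih h)

lemma keys_ofList_eq {ν : Type} (ps : List (String × ν)) :
    (PySem.Dict.ofList ps).keys = PySem.Set.ofList (ps.map Prod.fst) := by
  have h := PySem.Dict.keys_foldl_insert_key ps Prod.fst (fun _ q => q.2)
      (PySem.Dict.empty : PySem.Dict String ν)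
  have h2 : (ps.foldl (fun d x => d.insert x.1 x.2) PySem.Dict.empty).keys
      = PySem.Set.update PySem.Dict.empty.keys (ps.map Prod.fst) := h
  show (ps.foldl (fun d q => d.insert q.1 q.2) PySem.Dict.empty).keys = _
  rw [h2, PySem.Dict.keys_empty, PySem.Set.update_nil_left]

lemma contains_ofList_iff {ν : Type} (ps : List (String × ν)) (k : String) :
    (PySem.Dict.ofList ps).contains k = true ↔ k ∈ ps.map Prod.fst := by
  rw [PySem.Dict.contains_iff_mem_keys, keys_ofList_eq, PySem.Set.mem_ofList]

lemma rowD_items (Gd : PySem.Dict String (List (String × Int))) (parent : PySem.Dict String (Option String)) (u : String) :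
    (rowD Gd parent u).items = (rvsOf Gd u).map (fun v => (v, colr parent u v)) := by
  unfold rowD
  have h := PySem.Dict.items_foldl_insert_fresh (rvsOf Gd u) (fun v => v) (fun v => colr parent u v)
      PySem.Dict.empty (fun a _ => PySem.Dict.contains_empty a) (by simpa using nodup_rvsOf Gd u)
  simpa using h

lemma rowD_keys (Gd : PySem.Dict String (List (String × Int))) (parent : PySem.Dict String (Option String)) (u : String) :
    (rowD Gd parent u).keys = rvsOf Gd u := by
  show (rowD Gd parent u).items.map Prod.fst = _
  rw [rowD_items]
  rw [List.map_map, show (Prod.fst ∘ fun v => (v, colr parent u v)) = id from rfl, List.map_id]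

lemma rowD_get? (Gd : PySem.Dict String (List (String × Int))) (parent : PySem.Dict String (Option String)) (u x : String) :
    (rowD Gd parent u).get? x = if x ∈ rvsOf Gd u then some (colr parent u x) else none := by
  by_cases hx : x ∈ rvsOf Gd u
  · rw [if_pos hx]
    rw [PySem.Dict.get?_eq_some_iff_mem_items _ _ _ (by rw [rowD_keys]; exact nodup_rvsOf Gd u)]
    rw [rowD_items]
    exact List.mem_map.mpr ⟨x, hx, rfl⟩
  · rw [if_neg hx, PySem.Dict.get?_eq_none_iff_not_mem_keys, rowD_keys]
    exact hx

lemma rowAt_items (parent0 : PySem.Dict String (Option String)) (curr : String) (pre : List String)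
    (hpre : pre.Nodup) :
    (rowAt parent0 curr pre).items = pre.map (fun v => (v, col0 parent0 curr v)) := by
  unfold rowAt
  have h := PySem.Dict.items_foldl_insert_fresh pre (fun v => v) (fun v => col0 parent0 curr v)
      PySem.Dict.empty (fun a _ => PySem.Dict.contains_empty a) (by simpa using hpre)
  simpa using h

lemma rowAt_get? (parent0 : PySem.Dict String (Option String)) (curr : String) (pre : List String)
    (hpre : pre.Nodup) (x : String) :
    (rowAt parent0 curr pre).get? x = if x ∈ pre then some (col0 parent0 curr x) else none := by
  have hkeys : (rowAt parent0 curr pre).keys = pre := by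
    show (rowAt parent0 curr pre).items.map Prod.fst = _
    rw [rowAt_items _ _ _ hpre]
    rw [List.map_map, show (Prod.fst ∘ fun v => (v, col0 parent0 curr v)) = id from rfl, List.map_id]
  by_cases hx : x ∈ pre
  · rw [if_pos hx]
    rw [PySem.Dict.get?_eq_some_iff_mem_items _ _ _ (by rw [hkeys]; exact hpre)]
    rw [rowAt_items _ _ _ hpre]
    exact List.mem_map.mpr ⟨x, hx, rfl⟩
  · rw [if_neg hx, PySem.Dict.get?_eq_none_iff_not_mem_keys, hkeys]
    exact hx

lemma get?_foldl_insert_const {ν : Type} (fs : List String) (p : PySem.Dict String ν) (c : ν) (x : String) :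
    (fs.foldl (fun p v => p.insert v c) p).get? x = if x ∈ fs then some c else p.get? x := by
  induction fs generalizing p with
  | nil => simp
  | cons f fs ih =>
    simp only [List.foldl_cons, ih, List.mem_cons]
    by_cases hx : x ∈ fs
    · simp [hx]
    · by_cases hf : x = f
      · simp [hf]
      · simp [hx, hf, PySem.Dict.get?_insert]

lemma contains_foldl_insert_const {ν : Type} (fs : List String) (p : PySem.Dict String ν) (c : ν) (x : String) :
    (fs.foldl (fun p v => p.insert v c) p).contains x = (decide (x ∈ fs) || p.contains x) := by
  induction fs generalizing p with
  | nil => simp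
  | cons f fs ih =>
    simp only [List.foldl_cons, ih, List.mem_cons, PySem.Dict.contains_insert]
    by_cases hx : x ∈ fs <;> by_cases hf : x = f <;> simp [hx, hf]

lemma get?_parentAt_old (parent0 : PySem.Dict String (Option String)) (curr : String) (pre : List String)
    (x : String) (hx : x ∉ freshOf parent0 pre) :
    (parentAt parent0 curr pre).get? x = parent0.get? x := by
  unfold parentAt; rw [get?_foldl_insert_const]; simp [hx]

lemma get?_parentAt_fresh (parent0 : PySem.Dict String (Option String)) (curr : String) (pre : List String)
    (x : String) (hx : x ∈ freshOf parent0 pre) :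
    (parentAt parent0 curr pre).get? x = some (some curr) := by
  unfold parentAt; rw [get?_foldl_insert_const]; simp [hx]

lemma contains_parentAt (parent0 : PySem.Dict String (Option String)) (curr : String) (pre : List String) (x : String) :
    (parentAt parent0 curr pre).contains x = (decide (x ∈ freshOf parent0 pre) || parent0.contains x) := by
  unfold parentAt; rw [contains_foldl_insert_const]

lemma keys_parentAt (parent0 : PySem.Dict String (Option String)) (curr : String) (pre : List String)
    (hnd : (freshOf parent0 pre).Nodup) :
    (parentAt parent0 curr pre).keys = parent0.keys ++ freshOf parent0 pre := by
  unfold parentAt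
  rw [PySem.Dict.keys_foldl_insert_key (freshOf parent0 pre) (fun v => v) (fun _ _ => some curr) parent0]
  have hid : List.map (fun v => v) (freshOf parent0 pre) = freshOf parent0 pre := List.map_id _
  rw [hid]
  exact PySem.Set.update_eq_append_of_disjoint _ _ hnd (by
    intro x hx
    rw [← PySem.Dict.contains_iff_mem_keys]
    have := List.of_mem_filter hx
    simp at this
    simp [this])

lemma filt_len_insert {ν : Type} (U : List String) (hU : U.Nodup) (p : PySem.Dict String ν) (v : String)
    (hv : v ∈ U) (hc : p.contains v = false) (w : ν) :
    (U.filter (fun x => !(p.insert v w).contains x)).length + 1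
      = (U.filter (fun x => !p.contains x)).length := by
  induction U with
  | nil => simp at hv
  | cons a U ih =>
    have hnd := List.nodup_cons.mp hU
    rcases List.mem_cons.mp hv with rfl | hv'
    · have h1 : (!(p.insert v w).contains v) = false := by
        simp [PySem.Dict.contains_insert]
      have h2 : (!p.contains v) = true := by simp [hc]
      have htail : U.filter (fun x => !(p.insert v w).contains x) = U.filter (fun x => !p.contains x) := by
        apply List.filter_congr
        intro x hx
        have hxv : x ≠ v := fun h => hnd.1 (h ▸ hx)
        simp [PySem.Dict.contains_insert, hxv]
      simp only [List.filter_cons, h1, h2, if_pos, Bool.false_eq_true, if_false, htail, List.length_cons]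
    · have hav : a ≠ v := fun h => hnd.1 (h ▸ hv')
      have heq : (!(p.insert v w).contains a) = (!p.contains a) := by
        simp [PySem.Dict.contains_insert, hav]
      have ihr := ih hnd.2 hv'
      simp only [List.filter_cons, heq]
      cases h : (!p.contains a) <;>
        simp only [List.length_cons, Bool.false_eq_true, if_false, if_true, ihr] <;>
        omega

lemma filt_len_foldl (U : List String) (hU : U.Nodup) (curr : String) (fs : List String) :
    ∀ (p : PySem.Dict String (Option String)), fs.Nodup → (∀ v ∈ fs, p.contains v = false ∧ v ∈ U) →
    (U.filter (fun x => !(fs.foldl (fun p v => p.insert v (some curr)) p).contains x)).length + fs.length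
      = (U.filter (fun x => !p.contains x)).length := by
  induction fs with
  | nil => intro p _ _; simp
  | cons f fs ih =>
    intro p hnd hall
    have hf := hall f (by simp)
    have hrest : ∀ v ∈ fs, (p.insert f (some curr)).contains v = false ∧ v ∈ U := by
      intro v hv
      have hvf : v ≠ f := fun h => (List.nodup_cons.mp hnd).1 (h ▸ hv)
      have hv2 := hall v (List.mem_cons_of_mem _ hv)
      constructor
      · rw [PySem.Dict.contains_insert]
        simp [hvf, hv2.1]
      · exact hv2.2
    have h1 := ih (p.insert f (some curr)) (List.nodup_cons.mp hnd).2 hrest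
    have h2 := filt_len_insert U hU p f hf.2 hf.1 (some curr)
    simp only [List.foldl_cons, List.length_cons]
    omega

lemma colr_agree (parent0 : PySem.Dict String (Option String))
    (parent' : PySem.Dict String (Option String))
    (hmono : ∀ x, parent0.contains x = true → parent'.get? x = parent0.get? x)
    (u v : String) (hu : parent0.contains u = true) (hv : parent0.contains v = true) :
    colr parent' u v = colr parent0 u v := by
  unfold colr
  rw [PySem.Dict.getD_eq_get?_getD, PySem.Dict.getD_eq_get?_getD,
      PySem.Dict.getD_eq_get?_getD, PySem.Dict.getD_eq_get?_getD,
      hmono u hu, hmono v hv]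

lemma rowD_agree (Gd : PySem.Dict String (List (String × Int))) (parent0 parent' : PySem.Dict String (Option String))
    (u : String)
    (hmono : ∀ x, parent0.contains x = true → parent'.get? x = parent0.get? x)
    (hu : parent0.contains u = true)
    (hnb : ∀ v ∈ rvsOf Gd u, parent0.contains v = true) :
    rowD Gd parent' u = rowD Gd parent0 u := by
  unfold rowD
  exact PySem.List.foldl_congr_mem _ _ _ _ (fun acc x hx => by
    rw [colr_agree parent0 parent' hmono u x hu (hnb x hx)])


-- the loop bodies of the two ports, named for the proofs
def stepAfn (curr : String) :=
  fun (st : PySem.Dict String (PySem.Dict String String) × List String × PySem.Dict String Bool) nb =>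
    let (S, nl, ex) := st
    if ex.contains nb = false then
      let S1 := S.insert nb PySem.Dict.empty
      (S1.insert curr ((S1.getD curr PySem.Dict.empty).insert nb "green"),
       nl ++ [nb], ex.insert nb true)
    else if (S.getD nb PySem.Dict.empty).get? curr = some "green" then
      (S.insert curr ((S.getD curr PySem.Dict.empty).insert nb "green"), nl, ex)
    else
      (S.insert curr ((S.getD curr PySem.Dict.empty).insert nb "red"), nl, ex)

def stepBfn (u : String) :=
  fun (st : PySem.Dict String (Option String) × List String × List String) v =>
    let (p, o, s) := st
    if p.contains v = false then (p.insert v (some u), o ++ [v], s ++ [v]) else st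

lemma aLoop_succ (Gd : PySem.Dict String (List (String × Int))) (fuel : Nat)
    (S : PySem.Dict String (PySem.Dict String String)) (stack : List String) (ex : PySem.Dict String Bool) :
    aLoop Gd (fuel + 1) S stack ex =
      match PySem.List.pop? stack (-1) with
      | none => S
      | some (curr, rest) =>
        match Gd.get? curr with
        | none => S
        | some adj =>
          let st := ((PySem.Dict.ofList adj).keys.reverse).foldl (stepAfn curr) (S, rest, ex)
          aLoop Gd fuel st.1 st.2.1 st.2.2 := rfl

lemma bLoop_succ (Gd : PySem.Dict String (List (String × Int))) (fuel : Nat)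
    (parent : PySem.Dict String (Option String)) (order stack : List String) :
    bLoop Gd (fuel + 1) parent order stack =
      match PySem.List.pop? stack (-1) with
      | none => (parent, order)
      | some (u, rest) =>
        match Gd.get? u with
        | none => (parent, order)
        | some adj =>
          let st := ((PySem.Dict.ofList adj).keys.reverse).foldl (stepBfn u) (parent, order, rest)
          bLoop Gd fuel st.1 st.2.1 st.2.2 := rfl


lemma mem_freshOf_iff (parent0 : PySem.Dict String (Option String)) (pre : List String) (x : String) :
    x ∈ freshOf parent0 pre ↔ x ∈ pre ∧ parent0.contains x = false := by
  unfold freshOf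
  simp [List.mem_filter]

lemma freshOf_concat_true (parent0 : PySem.Dict String (Option String)) (pre : List String) (nb : String)
    (h : parent0.contains nb = true) : freshOf parent0 (pre ++ [nb]) = freshOf parent0 pre := by
  unfold freshOf
  rw [List.filter_append]
  simp [h]

lemma freshOf_concat_false (parent0 : PySem.Dict String (Option String)) (pre : List String) (nb : String)
    (h : parent0.contains nb = false) : freshOf parent0 (pre ++ [nb]) = freshOf parent0 pre ++ [nb] := by
  unfold freshOf
  rw [List.filter_append]
  simp [h]

lemma rowAt_concat (parent0 : PySem.Dict String (Option String)) (curr : String) (pre : List String) (nb : String) :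
    rowAt parent0 curr (pre ++ [nb]) = (rowAt parent0 curr pre).insert nb (col0 parent0 curr nb) := by
  unfold rowAt
  rw [List.foldl_append]
  rfl

lemma parentAt_concat_true (parent0 : PySem.Dict String (Option String)) (curr : String) (pre : List String)
    (nb : String) (h : parent0.contains nb = true) :
    parentAt parent0 curr (pre ++ [nb]) = parentAt parent0 curr pre := by
  unfold parentAt
  rw [freshOf_concat_true _ _ _ h]

lemma parentAt_concat_false (parent0 : PySem.Dict String (Option String)) (curr : String) (pre : List String)
    (nb : String) (h : parent0.contains nb = false) :
    parentAt parent0 curr (pre ++ [nb]) = (parentAt parent0 curr pre).insert nb (some curr) := by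
  unfold parentAt
  rw [freshOf_concat_false _ _ _ h, List.foldl_append]
  rfl

lemma getD_none_eq_some_iff (p : PySem.Dict String (Option String)) (x y : String) :
    p.getD x none = some y ↔ p.get? x = some (some y) := by
  rw [PySem.Dict.getD_eq_get?_getD]
  cases h : p.get? x <;> simp

lemma itemsAt_keys (Gd : PySem.Dict String (List (String × Int))) (parent0 : PySem.Dict String (Option String))
    (curr : String) (order0 rest pre : List String) :
    (itemsAt Gd parent0 curr order0 rest pre).map Prod.fst = order0 ++ freshOf parent0 pre := by
  unfold itemsAt
  rw [List.map_append, List.map_map, List.map_map]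
  congr 1
  · exact (List.map_congr_left (fun u _ => by by_cases h : u = curr <;> simp [h])).trans (List.map_id _)
  · exact (List.map_congr_left (fun u _ => rfl)).trans (List.map_id _)

-- one simultaneous step over neighbour nb of curr
lemma step_sim (Gd : PySem.Dict String (List (String × Int))) (parent0 : PySem.Dict String (Option String))
    (order0 rest : List String) (curr : String)
    (H1 : parent0.keys = order0) (H2 : order0.Nodup) (H3 : (rest ++ [curr]).Nodup)
    (H4 : ∀ v ∈ rest ++ [curr], v ∈ order0)
    (H5 : ∀ v w, parent0.get? v = some (some w) → w ∈ order0 ∧ w ∉ (rest ++ [curr]) ∧ v ∈ rvsOf Gd w ∧ v ≠ w)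
    (pre : List String) (nb : String) (l : List String)
    (hsplit : rvsOf Gd curr = pre ++ nb :: l)
    (S : PySem.Dict String (PySem.Dict String String)) (ex : PySem.Dict String Bool)
    (hS : S.items = itemsAt Gd parent0 curr order0 rest pre)
    (hex : ∀ v, ex.contains v = (parentAt parent0 curr pre).contains v) :
    (stepAfn curr (S, rest ++ freshOf parent0 pre, ex) nb).1.items
        = itemsAt Gd parent0 curr order0 rest (pre ++ [nb])
    ∧ (stepAfn curr (S, rest ++ freshOf parent0 pre, ex) nb).2.1
        = rest ++ freshOf parent0 (pre ++ [nb])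
    ∧ (∀ v, (stepAfn curr (S, rest ++ freshOf parent0 pre, ex) nb).2.2.contains v
        = (parentAt parent0 curr (pre ++ [nb])).contains v)
    ∧ stepBfn curr (parentAt parent0 curr pre, order0 ++ freshOf parent0 pre, rest ++ freshOf parent0 pre) nb
        = (parentAt parent0 curr (pre ++ [nb]), order0 ++ freshOf parent0 (pre ++ [nb]),
           rest ++ freshOf parent0 (pre ++ [nb])) := by
  have hrvs_nodup : (pre ++ nb :: l).Nodup := hsplit ▸ nodup_rvsOf Gd curr
  obtain ⟨hpre_nd, hcons_nd, hdisj⟩ := List.nodup_append.mp hrvs_nodup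
  have hnbpre : nb ∉ pre := fun h => hdisj nb h nb (List.mem_cons_self) rfl
  have hcurr_order : curr ∈ order0 := H4 curr (by simp)
  obtain ⟨hrest_nd, _, hdisj2⟩ := List.nodup_append.mp H3
  have hcurr_rest : curr ∉ rest := fun h => hdisj2 curr h curr (by simp) rfl
  have hfresh_sub : ∀ x ∈ freshOf parent0 pre, x ∈ pre ∧ parent0.contains x = false :=
    fun x hx => (mem_freshOf_iff _ _ _).mp hx
  have hfresh_not_order : ∀ x ∈ freshOf parent0 pre, x ∉ order0 := by
    intro x hx hmem
    have hc := (hfresh_sub x hx).2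
    rw [← H1] at hmem
    rw [(PySem.Dict.contains_iff_mem_keys parent0 x).mpr hmem] at hc
    cases hc
  have hfresh_nd : (freshOf parent0 pre).Nodup := hpre_nd.filter _
  have hSkeys : S.keys = order0 ++ freshOf parent0 pre := by
    have h0 : S.keys = S.items.map Prod.fst := rfl
    rw [h0, hS, itemsAt_keys]
  have hSkeys_nd : S.keys.Nodup := by
    rw [hSkeys]
    exact List.nodup_append.mpr ⟨H2, hfresh_nd, fun a ha b hb heq => hfresh_not_order b hb (heq ▸ ha)⟩
  have hcurr_item0 : (curr, rowAt parent0 curr pre) ∈ itemsAt Gd parent0 curr order0 rest pre := by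
    unfold itemsAt
    exact List.mem_append_left _ (List.mem_map.mpr ⟨curr, hcurr_order, by simp⟩)
  have hcurr_item : (curr, rowAt parent0 curr pre) ∈ S.items := by rw [hS]; exact hcurr_item0
  have hgetD_curr : S.getD curr PySem.Dict.empty = rowAt parent0 curr pre :=
    PySem.Dict.getD_of_mem_items S hcurr_item hSkeys_nd _
  have hScont_curr : S.contains curr = true :=
    (PySem.Dict.contains_iff_mem_keys S curr).mpr (by rw [hSkeys]; exact List.mem_append_left _ hcurr_order)
  have hcontains_curr_parent : parent0.contains curr = true :=
    (PySem.Dict.contains_iff_mem_keys _ _).mpr (H1 ▸ hcurr_order)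
  have hnbfresh : nb ∉ freshOf parent0 pre := fun h => hnbpre (hfresh_sub nb h).1
  have hexnb : ex.contains nb = parent0.contains nb := by
    rw [hex nb, contains_parentAt]
    simp [hnbfresh]
  by_cases hf : parent0.contains nb = false
  · -- nb is freshly discovered
    have hexnb' : ex.contains nb = false := by rw [hexnb, hf]
    have hnb_not_order : nb ∉ order0 := by
      intro h; rw [← H1] at h
      rw [(PySem.Dict.contains_iff_mem_keys parent0 nb).mpr h] at hf; cases hf
    have hScont : S.contains nb = false := by
      cases h : S.contains nb
      · rfl
      · exfalso
        have hm := (PySem.Dict.contains_iff_mem_keys S nb).mp h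
        rw [hSkeys] at hm
        rcases List.mem_append.mp hm with h1 | h2
        · exact hnb_not_order h1
        · exact hnbpre (hfresh_sub nb h2).1
    have hitems1 : (S.insert nb PySem.Dict.empty).items
        = itemsAt Gd parent0 curr order0 rest pre ++ [(nb, PySem.Dict.empty)] := by
      rw [PySem.Dict.items_insert_of_not_contains S _ hScont, hS]
    have hkeys1 : (S.insert nb PySem.Dict.empty).keys = (order0 ++ freshOf parent0 pre) ++ [nb] := by
      rw [PySem.Dict.keys_insert_of_not_contains S _ hScont, hSkeys]
    have hSkeys_nd' : (order0 ++ freshOf parent0 pre).Nodup := hSkeys ▸ hSkeys_nd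
    have hkeys1_nd : (S.insert nb PySem.Dict.empty).keys.Nodup := by
      rw [hkeys1]
      refine List.nodup_append.mpr ⟨hSkeys_nd', List.nodup_singleton _, ?_⟩
      intro a ha b hb heq
      rw [List.mem_singleton] at hb
      rw [hb] at heq
      rw [heq] at ha
      rw [← hSkeys] at ha
      rw [(PySem.Dict.contains_iff_mem_keys S nb).mpr ha] at hScont; cases hScont
    have hmem1 : (curr, rowAt parent0 curr pre) ∈ (S.insert nb PySem.Dict.empty).items := by
      rw [hitems1]; exact List.mem_append_left _ hcurr_item0
    have hgetD1 : (S.insert nb PySem.Dict.empty).getD curr PySem.Dict.empty = rowAt parent0 curr pre :=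
      PySem.Dict.getD_of_mem_items _ hmem1 hkeys1_nd _
    have hcont1 : (S.insert nb PySem.Dict.empty).contains curr = true := by
      rw [PySem.Dict.contains_insert]
      simp [hScont_curr]
    have hcol : col0 parent0 curr nb = "green" := by unfold col0; simp [hf]
    have hncurr : nb ≠ curr := fun h => hnb_not_order (h ▸ hcurr_order)
    have hA : (order0.map (fun u => if u = curr then (u, rowAt parent0 curr pre)
          else (u, if u ∈ rest then PySem.Dict.empty else rowD Gd parent0 u))).map
        (fun p : String × PySem.Dict String String =>
          if (p.1 == curr) = true then (curr, (rowAt parent0 curr pre).insert nb "green") else p)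
        = order0.map (fun u => if u = curr then (u, rowAt parent0 curr (pre ++ [nb]))
          else (u, if u ∈ rest then PySem.Dict.empty else rowD Gd parent0 u)) := by
      rw [List.map_map]
      refine List.map_congr_left (fun u hu => ?_)
      by_cases h : u = curr
      · subst h
        rw [rowAt_concat, hcol]
        simp
      · simp [h]
    have hB : ((freshOf parent0 pre).map (fun v => (v, (PySem.Dict.empty : PySem.Dict String String)))).map
        (fun p : String × PySem.Dict String String =>
          if (p.1 == curr) = true then (curr, (rowAt parent0 curr pre).insert nb "green") else p)
        = (freshOf parent0 pre).map (fun v => (v, (PySem.Dict.empty : PySem.Dict String String))) := by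
      rw [List.map_map]
      refine List.map_congr_left (fun v hv => ?_)
      have hvc : v ≠ curr := fun h => hfresh_not_order v hv (h ▸ hcurr_order)
      simp [hvc]
    have hmapped : (itemsAt Gd parent0 curr order0 rest pre ++ [(nb, PySem.Dict.empty)]).map
        (fun p : String × PySem.Dict String String =>
          if (p.1 == curr) = true then (curr, (rowAt parent0 curr pre).insert nb "green") else p)
        = itemsAt Gd parent0 curr order0 rest (pre ++ [nb]) := by
      conv_lhs => unfold itemsAt
      rw [List.map_append, List.map_append, hA, hB]
      conv_rhs => unfold itemsAt
      rw [freshOf_concat_false _ _ _ hf, List.map_append]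
      simp [hncurr, List.append_assoc]
    have hstep : stepAfn curr (S, rest ++ freshOf parent0 pre, ex) nb
        = ((S.insert nb PySem.Dict.empty).insert curr
             (((S.insert nb PySem.Dict.empty).getD curr PySem.Dict.empty).insert nb "green"),
           (rest ++ freshOf parent0 pre) ++ [nb], ex.insert nb true) := by
      simp only [stepAfn, hexnb']
      simp
    refine ⟨?_, ?_, ?_, ?_⟩
    · rw [hstep]
      show ((S.insert nb PySem.Dict.empty).insert curr _).items = _
      rw [hgetD1, PySem.Dict.items_insert_of_contains _ _ hcont1, hitems1]
      exact hmapped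
    · rw [hstep]
      show (rest ++ freshOf parent0 pre) ++ [nb] = _
      rw [freshOf_concat_false _ _ _ hf, List.append_assoc]
    · intro v
      rw [hstep]
      show (ex.insert nb true).contains v = _
      rw [PySem.Dict.contains_insert, hex v, parentAt_concat_false _ _ _ _ hf,
          PySem.Dict.contains_insert]
    · have hcontB : (parentAt parent0 curr pre).contains nb = false := by
        rw [contains_parentAt]
        simp [hnbfresh, hf]
      simp only [stepBfn, hcontB]
      rw [parentAt_concat_false _ _ _ _ hf, freshOf_concat_false _ _ _ hf,
          List.append_assoc, List.append_assoc]
      simp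
  · -- nb was seen before
    have ht : parent0.contains nb = true := by revert hf; cases parent0.contains nb <;> simp
    have hexnb' : ex.contains nb = true := by rw [hexnb, ht]
    have hnb_order : nb ∈ order0 := H1 ▸ (PySem.Dict.contains_iff_mem_keys _ _).mp ht
    have hnb_item : (nb, if nb = curr then rowAt parent0 curr pre
        else if nb ∈ rest then PySem.Dict.empty else rowD Gd parent0 nb) ∈ S.items := by
      rw [hS]
      unfold itemsAt
      apply List.mem_append_left
      refine List.mem_map.mpr ⟨nb, hnb_order, ?_⟩
      by_cases h : nb = curr <;> simp [h]
    have hgetD_nb : S.getD nb PySem.Dict.empty = (if nb = curr then rowAt parent0 curr pre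
        else if nb ∈ rest then PySem.Dict.empty else rowD Gd parent0 nb) :=
      PySem.Dict.getD_of_mem_items S hnb_item hSkeys_nd _
    have hnot_parent_curr_self : ¬ parent0.getD curr none = some curr := by
      intro h
      obtain ⟨_, _, _, hne⟩ := H5 curr curr ((getD_none_eq_some_iff _ _ _).mp h)
      exact hne rfl
    have hiff : ((S.getD nb PySem.Dict.empty).get? curr = some "green")
        ↔ parent0.getD curr none = some nb := by
      rw [hgetD_nb]
      by_cases hc1 : nb = curr
      · subst hc1
        rw [if_pos rfl, rowAt_get? _ _ _ hpre_nd]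
        apply iff_of_false
        · intro h
          by_cases hmem : nb ∈ pre
          · rw [if_pos hmem] at h
            unfold col0 at h
            rw [if_pos hcontains_curr_parent, if_neg hnot_parent_curr_self] at h
            exact absurd (Option.some.inj h) (by decide)
          · rw [if_neg hmem] at h; exact absurd h (by simp)
        · exact hnot_parent_curr_self
      · rw [if_neg hc1]
        by_cases hc2 : nb ∈ rest
        · rw [if_pos hc2]
          apply iff_of_false
          · rw [PySem.Dict.get?_empty]; simp
          · intro h
            obtain ⟨_, hnotin, _, _⟩ := H5 curr nb ((getD_none_eq_some_iff _ _ _).mp h)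
            exact hnotin (List.mem_append_left _ hc2)
        · rw [if_neg hc2, rowD_get?]
          constructor
          · intro h
            by_cases hmem : curr ∈ rvsOf Gd nb
            · rw [if_pos hmem] at h
              have hcol' : colr parent0 nb curr = "green" := Option.some.inj h
              unfold colr at hcol'
              by_cases hd : parent0.getD curr none = some nb ∨ parent0.getD nb none = some curr
              · rcases hd with hd | hd
                · exact hd
                · exfalso
                  obtain ⟨_, hnotin, _, _⟩ := H5 nb curr ((getD_none_eq_some_iff _ _ _).mp hd)
                  exact hnotin (by simp)
              · rw [if_neg hd] at hcol'
                exact absurd hcol' (by decide)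
            · rw [if_neg hmem] at h; exact absurd h (by simp)
          · intro h
            obtain ⟨_, _, hmem, _⟩ := H5 curr nb ((getD_none_eq_some_iff _ _ _).mp h)
            rw [if_pos hmem]
            unfold colr
            rw [if_pos (Or.inl h)]
    have hcol0 : col0 parent0 curr nb = (if parent0.getD curr none = some nb then "green" else "red") := by
      unfold col0; rw [if_pos ht]
    have hstep : stepAfn curr (S, rest ++ freshOf parent0 pre, ex) nb
        = (S.insert curr ((S.getD curr PySem.Dict.empty).insert nb (col0 parent0 curr nb)),
           rest ++ freshOf parent0 pre, ex) := by
      simp only [stepAfn, hexnb']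
      by_cases hg : parent0.getD curr none = some nb
      · rw [if_neg (by simp), if_pos (hiff.mpr hg), hcol0, if_pos hg]
      · rw [if_neg (by simp), if_neg (fun h => hg (hiff.mp h)), hcol0, if_neg hg]
    have hitems_fin : (S.insert curr ((S.getD curr PySem.Dict.empty).insert nb (col0 parent0 curr nb))).items
        = itemsAt Gd parent0 curr order0 rest (pre ++ [nb]) := by
      rw [hgetD_curr, PySem.Dict.items_insert_of_contains _ _ hScont_curr, hS]
      conv_lhs => unfold itemsAt
      rw [List.map_append, List.map_map, List.map_map]
      conv_rhs => unfold itemsAt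
      rw [freshOf_concat_true _ _ _ ht]
      congr 1
      · refine List.map_congr_left (fun u hu => ?_)
        by_cases h : u = curr
        · subst h
          rw [rowAt_concat]
          simp
        · simp [h]
      · refine List.map_congr_left (fun v hv => ?_)
        have hvc : v ≠ curr := fun h => hfresh_not_order v hv (h ▸ hcurr_order)
        simp [hvc]
    refine ⟨?_, ?_, ?_, ?_⟩
    · rw [hstep]; exact hitems_fin
    · rw [hstep]
      show rest ++ freshOf parent0 pre = _
      rw [freshOf_concat_true _ _ _ ht]
    · intro v
      rw [hstep]
      show ex.contains v = _
      rw [hex v, parentAt_concat_true _ _ _ _ ht]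
    · have hcontB : (parentAt parent0 curr pre).contains nb = true := by
        rw [contains_parentAt]
        simp [ht]
      simp only [stepBfn, hcontB]
      rw [parentAt_concat_true _ _ _ _ ht, freshOf_concat_true _ _ _ ht]
      simp

-- one simultaneous pass over the (remaining) reversed neighbour list of curr
lemma fold_sim (Gd : PySem.Dict String (List (String × Int))) (parent0 : PySem.Dict String (Option String))
    (order0 rest : List String) (curr : String)
    (H1 : parent0.keys = order0) (H2 : order0.Nodup) (H3 : (rest ++ [curr]).Nodup)
    (H4 : ∀ v ∈ rest ++ [curr], v ∈ order0)
    (H5 : ∀ v w, parent0.get? v = some (some w) → w ∈ order0 ∧ w ∉ (rest ++ [curr]) ∧ v ∈ rvsOf Gd w ∧ v ≠ w) :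
    ∀ (l pre : List String), rvsOf Gd curr = pre ++ l →
    ∀ (S : PySem.Dict String (PySem.Dict String String)) (ex : PySem.Dict String Bool),
    S.items = itemsAt Gd parent0 curr order0 rest pre →
    (∀ v, ex.contains v = (parentAt parent0 curr pre).contains v) →
    (l.foldl (stepAfn curr) (S, rest ++ freshOf parent0 pre, ex)).1.items
        = itemsAt Gd parent0 curr order0 rest (pre ++ l)
    ∧ (l.foldl (stepAfn curr) (S, rest ++ freshOf parent0 pre, ex)).2.1
        = rest ++ freshOf parent0 (pre ++ l)
    ∧ (∀ v, (l.foldl (stepAfn curr) (S, rest ++ freshOf parent0 pre, ex)).2.2.contains v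
        = (parentAt parent0 curr (pre ++ l)).contains v)
    ∧ l.foldl (stepBfn curr) (parentAt parent0 curr pre, order0 ++ freshOf parent0 pre, rest ++ freshOf parent0 pre)
        = (parentAt parent0 curr (pre ++ l), order0 ++ freshOf parent0 (pre ++ l), rest ++ freshOf parent0 (pre ++ l)) := by
  intro l
  induction l with
  | nil =>
    intro pre hsplit S ex hS hex
    refine ⟨by simpa using hS, by simp, by simpa using hex, by simp⟩
  | cons nb l ihl =>
    intro pre hsplit S ex hS hex
    obtain ⟨h1, h2, h3, h4⟩ := step_sim Gd parent0 order0 rest curr H1 H2 H3 H4 H5 pre nb l hsplit S ex hS hex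
    have hsplit' : rvsOf Gd curr = (pre ++ [nb]) ++ l := by rw [hsplit]; simp
    have hassoc : pre ++ nb :: l = (pre ++ [nb]) ++ l := by simp
    rcases hT : stepAfn curr (S, rest ++ freshOf parent0 pre, ex) nb with ⟨S', stk', ex'⟩
    rw [hT] at h1 h2 h3
    simp only at h1 h2 h3
    obtain ⟨hA1, hA2, hA3, hB⟩ := ihl (pre ++ [nb]) hsplit' S' ex' h1 h3
    rw [hassoc]
    subst h2
    refine ⟨?_, ?_, ?_, ?_⟩
    · simpa only [List.foldl_cons, hT] using hA1
    · simpa only [List.foldl_cons, hT] using hA2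
    · simpa only [List.foldl_cons, hT] using hA3
    · simpa only [List.foldl_cons, h4] using hB

-- after the whole pass, A's rows can be re-read relative to the NEW parent map
lemma itemsAt_full (Gd : PySem.Dict String (List (String × Int))) (parent0 : PySem.Dict String (Option String))
    (order0 rest : List String) (curr : String)
    (H1 : parent0.keys = order0) (H3 : (rest ++ [curr]).Nodup)
    (H4 : ∀ v ∈ rest ++ [curr], v ∈ order0)
    (H5 : ∀ v w, parent0.get? v = some (some w) → w ∈ order0 ∧ w ∉ (rest ++ [curr]) ∧ v ∈ rvsOf Gd w ∧ v ≠ w)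
    (H6 : ∀ u ∈ order0, u ∉ (rest ++ [curr]) → ∀ v ∈ rvsOf Gd u, parent0.contains v = true) :
    itemsAt Gd parent0 curr order0 rest (rvsOf Gd curr)
      = (order0 ++ freshOf parent0 (rvsOf Gd curr)).map (fun u =>
          (u, if u ∈ rest ++ freshOf parent0 (rvsOf Gd curr) then PySem.Dict.empty
              else rowD Gd (parentAt parent0 curr (rvsOf Gd curr)) u)) := by
  have hcurr_order : curr ∈ order0 := H4 curr (by simp)
  have hcontains_curr : parent0.contains curr = true :=
    (PySem.Dict.contains_iff_mem_keys _ _).mpr (H1 ▸ hcurr_order)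
  obtain ⟨hrest_nd, _, hdisj2⟩ := List.nodup_append.mp H3
  have hcurr_rest : curr ∉ rest := fun h => hdisj2 curr h curr (by simp) rfl
  have hfresh_mem : ∀ x ∈ freshOf parent0 (rvsOf Gd curr), x ∈ rvsOf Gd curr ∧ parent0.contains x = false :=
    fun x hx => (mem_freshOf_iff _ _ _).mp hx
  have hnotfresh : ∀ x, parent0.contains x = true → x ∉ freshOf parent0 (rvsOf Gd curr) := by
    intro x hx hmem
    rw [(hfresh_mem x hmem).2] at hx; cases hx
  have hmono : ∀ x, parent0.contains x = true → (parentAt parent0 curr (rvsOf Gd curr)).get? x = parent0.get? x :=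
    fun x hx => get?_parentAt_old _ _ _ _ (hnotfresh x hx)
  have hfresh_not_order : ∀ x ∈ freshOf parent0 (rvsOf Gd curr), x ∉ order0 := by
    intro x hx hmem
    have h2 := (hfresh_mem x hx).2
    rw [(PySem.Dict.contains_iff_mem_keys parent0 x).mpr (H1 ▸ hmem)] at h2; cases h2
  have hnever : ∀ v : String, ¬ parent0.getD v none = some curr := by
    intro v h
    obtain ⟨_, hnotin, _, _⟩ := H5 v curr ((getD_none_eq_some_iff _ _ _).mp h)
    exact hnotin (by simp)
  have hcol_eq : ∀ v ∈ rvsOf Gd curr,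
      col0 parent0 curr v = colr (parentAt parent0 curr (rvsOf Gd curr)) curr v := by
    intro v hv
    unfold col0 colr
    by_cases hcv : parent0.contains v = true
    · rw [if_pos hcv]
      have e1 : (parentAt parent0 curr (rvsOf Gd curr)).getD v none = parent0.getD v none := by
        rw [PySem.Dict.getD_eq_get?_getD, hmono v hcv, ← PySem.Dict.getD_eq_get?_getD]
      have e2 : (parentAt parent0 curr (rvsOf Gd curr)).getD curr none = parent0.getD curr none := by
        rw [PySem.Dict.getD_eq_get?_getD, hmono curr hcontains_curr, ← PySem.Dict.getD_eq_get?_getD]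
      rw [e1, e2]
      by_cases hg : parent0.getD curr none = some v
      · rw [if_pos hg, if_pos (Or.inr hg)]
      · rw [if_neg hg, if_neg ?_]
        intro hor
        rcases hor with hor | hor
        · exact hnever v hor
        · exact hg hor
    · have hcv' : parent0.contains v = false := by revert hcv; cases parent0.contains v <;> simp
      rw [if_neg (by rw [hcv']; simp)]
      have hvf : v ∈ freshOf parent0 (rvsOf Gd curr) := (mem_freshOf_iff _ _ _).mpr ⟨hv, hcv'⟩
      have hg : (parentAt parent0 curr (rvsOf Gd curr)).get? v = some (some curr) :=
        get?_parentAt_fresh _ _ _ _ hvf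
      rw [if_pos (Or.inl (by rw [PySem.Dict.getD_eq_get?_getD, hg]; rfl))]
  have hrow : rowAt parent0 curr (rvsOf Gd curr)
      = rowD Gd (parentAt parent0 curr (rvsOf Gd curr)) curr := by
    unfold rowAt rowD
    exact PySem.List.foldl_congr_mem _ _ _ _ (fun acc v hv => by rw [hcol_eq v hv])
  unfold itemsAt
  rw [List.map_append]
  congr 1
  · refine List.map_congr_left (fun u hu => ?_)
    by_cases hc : u = curr
    · have hnotin : curr ∉ rest ++ freshOf parent0 (rvsOf Gd curr) := by
        intro h
        rcases List.mem_append.mp h with h | h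
        · exact hcurr_rest h
        · exact hfresh_not_order curr h hcurr_order
      rw [if_pos hc, hc, if_neg hnotin, hrow]
    · rw [if_neg hc]
      by_cases hr : u ∈ rest
      · rw [if_pos hr, if_pos (List.mem_append_left _ hr)]
      · have hnotin : u ∉ rest ++ freshOf parent0 (rvsOf Gd curr) := by
          intro h
          rcases List.mem_append.mp h with h | h
          · exact hr h
          · exact hfresh_not_order u h hu
        rw [if_neg hr, if_neg hnotin]
        have hcont_u : parent0.contains u = true :=
          (PySem.Dict.contains_iff_mem_keys _ _).mpr (H1 ▸ hu)
        have hnbs : ∀ v ∈ rvsOf Gd u, parent0.contains v = true := by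
          apply H6 u hu
          intro h
          rcases List.mem_append.mp h with h | h
          · exact hr h
          · exact hc (List.mem_singleton.mp h)
        rw [rowD_agree Gd parent0 _ u hmono hcont_u hnbs]
  · refine List.map_congr_left (fun v hv => ?_)
    rw [if_pos (List.mem_append_right _ hv)]

lemma loop_sim (Gd : PySem.Dict String (List (String × Int))) (U : List String) (hU : U.Nodup)
    (HPre : ∀ u : String, ∀ v ∈ rvsOf Gd u, Gd.contains v = true ∧ v ∈ U) :
    ∀ (fuel : Nat) (parent : PySem.Dict String (Option String)) (order stack : List String)
      (S : PySem.Dict String (PySem.Dict String String)) (ex : PySem.Dict String Bool),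
    SimInv Gd parent order stack S ex →
    stack.length + (U.filter (fun x => !parent.contains x)).length ≤ fuel →
    (aLoop Gd fuel S stack ex).items.map (fun p => (p.1, p.2.items))
      = (bLoop Gd fuel parent order stack).2.map (fun u =>
          (u, (rvsOf Gd u).map (fun v => (v, colr (bLoop Gd fuel parent order stack).1 u v)))) := by
  intro fuel
  induction fuel with
  | zero =>
    intro parent order stack S ex hInv hfuel
    have hstack : stack = [] := by
      cases stack with
      | nil => rfl
      | cons a t => simp at hfuel
    subst hstack
    obtain ⟨hS, _⟩ := hInv
    show S.items.map _ = _
    rw [hS, List.map_map]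
    simp only [bLoop]
    refine List.map_congr_left (fun u hu => ?_)
    simp [rowD_items]
  | succ fuel ihf =>
    intro parent order stack S ex hInv hfuel
    rcases List.eq_nil_or_concat' stack with rfl | ⟨init, curr, rfl⟩
    · obtain ⟨hS, _⟩ := hInv
      rw [aLoop_succ, bLoop_succ]
      simp only [show PySem.List.pop? ([] : List String) (-1) = none from rfl]
      rw [hS, List.map_map]
      refine List.map_congr_left (fun u hu => ?_)
      simp [rowD_items]
    · obtain ⟨hS, hkeys, hex, hord_nd, hstk_nd, hstk_sub, hP5, hP6, hP9⟩ := hInv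
      have hcurr_mem : curr ∈ order := hstk_sub curr (by simp)
      have hGc : Gd.contains curr = true := hP9 curr hcurr_mem
      obtain ⟨adj, hadj⟩ : ∃ a, Gd.get? curr = some a := by
        cases h : Gd.get? curr with
        | none =>
          rw [PySem.Dict.get?_eq_none_iff_not_mem_keys] at h
          exact absurd ((PySem.Dict.contains_iff_mem_keys _ _).mp hGc) h
        | some a => exact ⟨a, rfl⟩
      have hrvs : rvsOf Gd curr = (PySem.Dict.ofList adj).keys.reverse := by
        unfold rvsOf; rw [hadj]
      have hcontains_curr : parent.contains curr = true :=
        (PySem.Dict.contains_iff_mem_keys _ _).mpr (hkeys ▸ hcurr_mem)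
      obtain ⟨hinit_nd, _, hdisj2⟩ := List.nodup_append.mp hstk_nd
      have hcurr_init : curr ∉ init := fun h => hdisj2 curr h curr (by simp) rfl
      -- initial state is the pre = [] state of the inner pass
      have hS0 : S.items = itemsAt Gd parent curr order init [] := by
        rw [hS]; unfold itemsAt freshOf
        simp only [List.filter_nil, List.map_nil, List.append_nil]
        refine List.map_congr_left (fun u hu => ?_)
        by_cases hc : u = curr
        · rw [if_pos (by rw [hc]; simp), if_pos hc, hc]; rfl
        · rw [if_neg hc]
          by_cases hr : u ∈ init
          · rw [if_pos (List.mem_append_left _ hr), if_pos hr]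
          · rw [if_neg (by
              intro h
              rcases List.mem_append.mp h with h | h
              · exact hr h
              · exact hc (List.mem_singleton.mp h)), if_neg hr]
      have hex0 : ∀ v, ex.contains v = (parentAt parent curr []).contains v := fun v => hex v
      obtain ⟨hA1, hA2, hA3, hB⟩ := fold_sim Gd parent order init curr hkeys hord_nd hstk_nd
        hstk_sub hP5 (rvsOf Gd curr) [] (by simp) S ex hS0 hex0
      simp only [show freshOf parent ([] : List String) = [] from rfl, List.append_nil,
        List.nil_append] at hA1 hA2 hA3 hB
      -- facts about the fresh block
      have hfr_nd : (freshOf parent (rvsOf Gd curr)).Nodup := (nodup_rvsOf Gd curr).filter _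
      have hfr_mem : ∀ x ∈ freshOf parent (rvsOf Gd curr), x ∈ rvsOf Gd curr ∧ parent.contains x = false :=
        fun x hx => (mem_freshOf_iff _ _ _).mp hx
      have hfr_not_order : ∀ x ∈ freshOf parent (rvsOf Gd curr), x ∉ order := by
        intro x hx hmem
        have h2 := (hfr_mem x hx).2
        rw [(PySem.Dict.contains_iff_mem_keys parent x).mpr (hkeys ▸ hmem)] at h2; cases h2
      have hcurr_fr : curr ∉ freshOf parent (rvsOf Gd curr) := fun h =>
        hfr_not_order curr h hcurr_mem
      have hfull := itemsAt_full Gd parent order init curr hkeys hstk_nd hstk_sub hP5 hP6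
      -- the new invariant
      have hInv' : SimInv Gd (parentAt parent curr (rvsOf Gd curr))
          (order ++ freshOf parent (rvsOf Gd curr)) (init ++ freshOf parent (rvsOf Gd curr))
          (((rvsOf Gd curr).foldl (stepAfn curr) (S, init, ex)).1)
          (((rvsOf Gd curr).foldl (stepAfn curr) (S, init, ex)).2.2) := by
        refine ⟨?_, ?_, ?_, ?_, ?_, ?_, ?_, ?_, ?_⟩
        · rw [hA1, hfull]
        · rw [keys_parentAt _ _ _ hfr_nd, hkeys]
        · exact hA3
        · exact List.nodup_append.mpr ⟨hord_nd, hfr_nd,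
            fun a ha b hb heq => hfr_not_order b hb (heq ▸ ha)⟩
        · exact List.nodup_append.mpr ⟨hinit_nd, hfr_nd,
            fun a ha b hb heq => hfr_not_order b hb (heq ▸ hstk_sub a (List.mem_append_left _ ha))⟩
        · intro v hv
          rcases List.mem_append.mp hv with h | h
          · exact List.mem_append_left _ (hstk_sub v (List.mem_append_left _ h))
          · exact List.mem_append_right _ h
        · intro v w hvw
          by_cases hvf : v ∈ freshOf parent (rvsOf Gd curr)
          · rw [get?_parentAt_fresh _ _ _ _ hvf] at hvw
            have hw : w = curr := by
              have := Option.some.inj hvw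
              exact (Option.some.inj this).symm
            subst hw
            refine ⟨List.mem_append_left _ hcurr_mem, ?_, (hfr_mem v hvf).1, ?_⟩
            · intro h
              rcases List.mem_append.mp h with h | h
              · exact hcurr_init h
              · exact hcurr_fr h
            · intro h
              rw [h] at hvf
              exact hcurr_fr hvf
          · rw [get?_parentAt_old _ _ _ _ hvf] at hvw
            obtain ⟨hw1, hw2, hw3, hw4⟩ := hP5 v w hvw
            refine ⟨List.mem_append_left _ hw1, ?_, hw3, hw4⟩
            intro h
            rcases List.mem_append.mp h with h | h
            · exact hw2 (List.mem_append_left _ h)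
            · exact hfr_not_order w h hw1
        · intro u hu hnotin v hv
          rcases List.mem_append.mp hu with hu' | hu'
          · by_cases hc : u = curr
            · rw [contains_parentAt]
              by_cases hcv : parent.contains v = true
              · simp [hcv]
              · have : v ∈ freshOf parent (rvsOf Gd curr) := (mem_freshOf_iff _ _ _).mpr
                  ⟨hc ▸ hv, by revert hcv; cases parent.contains v <;> simp⟩
                simp [this]
            · have : parent.contains v = true := by
                refine hP6 u hu' ?_ v hv
                intro h
                rcases List.mem_append.mp h with h | h
                · exact hnotin (List.mem_append_left _ h)
                · exact hc (List.mem_singleton.mp h)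
              rw [contains_parentAt]
              simp [this]
          · exact absurd (List.mem_append_right init hu') hnotin
        · intro v hv
          rcases List.mem_append.mp hv with h | h
          · exact hP9 v h
          · exact (HPre curr v (hfr_mem v h).1).1
      -- the fuel bound
      have hflen := filt_len_foldl U hU curr (freshOf parent (rvsOf Gd curr)) parent hfr_nd
        (fun v hv => ⟨(hfr_mem v hv).2, (HPre curr v (hfr_mem v hv).1).2⟩)
      have hbound : (init ++ freshOf parent (rvsOf Gd curr)).length
          + (U.filter (fun x => !(parentAt parent curr (rvsOf Gd curr)).contains x)).length ≤ fuel := by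
        have h1 : (parentAt parent curr (rvsOf Gd curr)) = ((freshOf parent (rvsOf Gd curr)).foldl
            (fun p v => p.insert v (some curr)) parent) := rfl
        rw [List.length_append, h1]
        have hlen := hfuel
        rw [List.length_append] at hlen
        simp only [List.length_singleton] at hlen
        omega
      have hrec := ihf (parentAt parent curr (rvsOf Gd curr))
        (order ++ freshOf parent (rvsOf Gd curr)) (init ++ freshOf parent (rvsOf Gd curr))
        _ _ hInv' hbound
      have hB' := hB
      rw [show parentAt parent curr ([] : List String) = parent from rfl] at hB'
      rw [aLoop_succ, bLoop_succ]
      simp only [PySem.List.pop?_last, hadj]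
      rw [← hrvs, hA2, hB']
      exact hrec

-- ===== VERDICT (by name: the statement is the Claim_ definition above) =====
theorem create_rooted_spanning_tree_spec : Claim_equal_create_rooted_spanning_tree := by
  intro G root _hdom hpre
  obtain ⟨hroot, hclosed⟩ := hpre
  unfold Spec_create_rooted_spanning_tree
  have HPre : ∀ u : String, ∀ v ∈ rvsOf (PySem.Dict.ofList G) u,
      (PySem.Dict.ofList G).contains v = true
        ∧ v ∈ PySem.Set.ofList (G.flatMap (fun p => p.2.map (·.1))) := by
    intro u v hv
    unfold rvsOf at hv
    cases h : (PySem.Dict.ofList G).get? u with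
    | none => rw [h] at hv; simp at hv
    | some adj =>
      rw [h] at hv
      rw [List.mem_reverse, keys_ofList_eq, PySem.Set.mem_ofList] at hv
      obtain ⟨q, hq, hq1⟩ := List.mem_map.mp hv
      have hG : (u, adj) ∈ G := get?_ofList_mem G u adj h
      constructor
      · rw [contains_ofList_iff]
        rw [← hq1]
        exact hclosed (u, adj) hG q hq
      · rw [PySem.Set.mem_ofList, List.mem_flatMap]
        refine ⟨(u, adj), hG, ?_⟩
        rw [← hq1]
        exact List.mem_map_of_mem hq
  have hGroot : (PySem.Dict.ofList G).contains root = true := (contains_ofList_iff G root).mpr hroot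
  have hInv0 : SimInv (PySem.Dict.ofList G)
      ((PySem.Dict.empty : PySem.Dict String (Option String)).insert root none)
      [root] [root]
      ((PySem.Dict.empty : PySem.Dict String (PySem.Dict String String)).insert root PySem.Dict.empty)
      ((PySem.Dict.empty : PySem.Dict String Bool).insert root true) := by
    refine ⟨?_, ?_, ?_, ?_, ?_, ?_, ?_, ?_, ?_⟩
    · rw [PySem.Dict.items_insert_of_not_contains _ _ (PySem.Dict.contains_empty root)]
      simp [show (PySem.Dict.empty : PySem.Dict String (PySem.Dict String String)).items = [] from rfl]
    · rw [PySem.Dict.keys_insert_of_not_contains _ _ (PySem.Dict.contains_empty root),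
        PySem.Dict.keys_empty]
      rfl
    · intro v
      rw [PySem.Dict.contains_insert, PySem.Dict.contains_insert,
        PySem.Dict.contains_empty, PySem.Dict.contains_empty]
    · simp
    · simp
    · simp
    · intro v w h
      rw [PySem.Dict.get?_insert] at h
      by_cases hv : v = root
      · rw [if_pos hv] at h
        exact absurd (Option.some.inj h) (by simp)
      · rw [if_neg hv, PySem.Dict.get?_empty] at h
        exact absurd h (by simp)
    · intro u hu hnot
      exact (hnot hu).elim
    · intro v hv
      rw [List.mem_singleton.mp hv]
      exact hGroot
  have hU := PySem.Set.nodup_ofList (G.flatMap (fun p => p.2.map (·.1)))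
  have hbound0 : ([root] : List String).length
      + ((PySem.Set.ofList (G.flatMap (fun p => p.2.map (·.1)))).filter
          (fun x => !((PySem.Dict.empty : PySem.Dict String (Option String)).insert root none).contains x)).length
      ≤ 1 + (G.flatMap (fun p => p.2.map (·.1))).length := by
    have h1 := List.length_filter_le
      (fun x => !((PySem.Dict.empty : PySem.Dict String (Option String)).insert root none).contains x)
      (PySem.Set.ofList (G.flatMap (fun p => p.2.map (·.1))))
    have h2 := PySem.Set.length_ofList_le (G.flatMap (fun p => p.2.map (·.1)))
    simp only [List.length_singleton]
    omega
  have hmain := loop_sim (PySem.Dict.ofList G)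
    (PySem.Set.ofList (G.flatMap (fun p => p.2.map (·.1)))) hU HPre
    (1 + (G.flatMap (fun p => p.2.map (·.1))).length)
    ((PySem.Dict.empty : PySem.Dict String (Option String)).insert root none)
    [root] [root]
    ((PySem.Dict.empty : PySem.Dict String (PySem.Dict String String)).insert root PySem.Dict.empty)
    ((PySem.Dict.empty : PySem.Dict String Bool).insert root true)
    hInv0 hbound0
  show create_rooted_spanning_tree G root = create_rooted_spanning_tree_alt G root
  unfold create_rooted_spanning_tree create_rooted_spanning_tree_alt
  refine hmain.trans ?_
  refine List.map_congr_left (fun u hu => ?_)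
  unfold rvsOf colr
  cases h : (PySem.Dict.ofList G).get? u with
  | none => simp
  | some adj => simp
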